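-- pv_equiv track=rewrite | github.com/pincerhq/pincer | src/pincer/tools/builtin/email_tool.py | _quote_mailbox
-- ===== SOURCE A (Python) =====
-- def _quote_mailbox(folder: str) -> str:
--     """Return mailbox string suitable for IMAP SELECT/COPY (quoted when needed per RFC 3501)."""
--     if not folder:
--         return '""'
--     need_quote = any(c in folder for c in " /[]\\")
--     if not need_quote:
--         return folder
--     escaped = folder.replace("\\", "\\\\").replace('"', '\\"')
--     return f'"{escaped}"'
-- ===== SOURCE B (Python) =====
-- def _quote_mailbox(folder: str) -> str:
--     """Return mailbox string suitable for IMAP SELECT/COPY (quoted when needed per RFC 3501)."""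
--     if not folder:
--         return '""'
--     need = False
--     esc = []
--     for ch in folder:
--         if ch in ' /[]\\':
--             need = True
--         if ch == '\\':
--             esc.append('\\\\')
--         elif ch == '"':
--             esc.append('\\"')
--         else:
--             esc.append(ch)
--     if need:
--         return '"' + ''.join(esc) + '"'
--     return folder
-- ===== Notes on version B (the rewrite author's own statement) =====
-- stated objective: alternative
-- what changed: B makes a single pass over the string, accumulating escaped pieces and the need-quote flag in one loop, instead of A's any() membership scan followed by two full .replace passes.
import Mathlib
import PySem

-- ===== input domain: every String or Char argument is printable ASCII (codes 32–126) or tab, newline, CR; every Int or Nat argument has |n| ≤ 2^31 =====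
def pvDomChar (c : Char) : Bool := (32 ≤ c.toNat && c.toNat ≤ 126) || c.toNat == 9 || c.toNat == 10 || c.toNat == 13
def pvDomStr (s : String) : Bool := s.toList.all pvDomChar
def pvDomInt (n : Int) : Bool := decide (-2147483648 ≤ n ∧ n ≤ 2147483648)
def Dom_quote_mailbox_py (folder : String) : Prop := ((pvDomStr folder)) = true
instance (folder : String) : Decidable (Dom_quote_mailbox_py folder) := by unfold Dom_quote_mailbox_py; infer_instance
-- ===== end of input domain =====

set_option maxHeartbeats 1000000


-- B fuses A's any() scan and two .replace passes into one traversal of the string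
-- (objective: alternative single-pass decomposition; the return value is proved identical).

-- ===== PORT A =====
def quote_mailbox_py (folder : String) : String :=
  if folder == "" then "\"\""
  else
    -- need_quote = any(c in folder for c in " /[]\\")
    let need_quote := (" /[]\\".toList).any (fun c => PySem.Str.isIn (String.ofList [c]) folder)
    if !need_quote then folder
    else
      let escaped := PySem.Str.replace (PySem.Str.replace folder "\\" "\\\\") "\"" "\\\""
      "\"" ++ escaped ++ "\""

-- ===== PORT B =====
-- one fold over the characters: state = (need flag, list of escaped pieces appended in order);
-- ''.join(esc) is ported as String.ofList of the flattened piece list (exact: join with empty sep).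
def quote_mailbox_py_alt (folder : String) : String :=
  if folder == "" then "\"\""
  else
    let st := folder.toList.foldl
      (fun (st : Bool × List (List Char)) ch =>
        let need := if ch ∈ (" /[]\\".toList) then true else st.1
        let esc := if ch == '\\' then st.2 ++ [['\\', '\\']]
                   else if ch == '"' then st.2 ++ [['\\', '"']]
                   else st.2 ++ [[ch]]
        (need, esc)) (false, [])
    if st.1 then "\"" ++ String.ofList st.2.flatten ++ "\"" else folder

-- ===== PRECONDITION & SPEC =====
def Spec_quote_mailbox_py (folder : String) (out : String) : Prop := out = quote_mailbox_py_alt folder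
instance (folder : String) (out : String) : Decidable (Spec_quote_mailbox_py folder out) := by unfold Spec_quote_mailbox_py; infer_instance

-- ===== CLAIM (what is proved, stated in full; the proofs are below) =====
def Claim_equal_quote_mailbox_py : Prop := ∀ (folder : String), Dom_quote_mailbox_py folder → Spec_quote_mailbox_py folder (quote_mailbox_py folder)

-- ===== LEMMAS AND PROOFS =====

-- the per-character escape of B (also the composition of A's two replaces)
def pvEsc (c : Char) : List Char :=
  if c == '\\' then ['\\', '\\'] else if c == '"' then ['\\', '"'] else [c]

-- single-character substring test is membership
theorem pv_singleton_infix (a : Char) (l : List Char) : [a] <:+: l ↔ a ∈ l := by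
  constructor
  · intro h; exact h.subset (List.mem_singleton_self a)
  · intro h; obtain ⟨s, t, rfl⟩ := List.append_of_mem h; exact ⟨s, t, by simp⟩

theorem pv_isIn_single (c : Char) (s : String) :
    PySem.Str.isIn (String.ofList [c]) s = decide (c ∈ s.toList) := by
  rcases h : decide (c ∈ s.toList) with _ | _
  · simp at h
    rcases hb : PySem.Str.isIn (String.ofList [c]) s with _ | _
    · rfl
    · exact absurd ((pv_singleton_infix c s.toList).mp (by simpa using (PySem.Str.isIn_iff_infix _ s).mp hb)) h
  · simp at h
    exact (PySem.Str.isIn_iff_infix _ s).mpr (by simpa using (pv_singleton_infix c s.toList).mpr h)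

-- single-character replace is a flatMap
theorem pv_go_single (a : Char) (new : List Char) :
    ∀ (l acc : List Char),
      PySem.Chars.replace.go [a] new l.length l acc
        = acc.reverse ++ l.flatMap (fun c => if c == a then new else [c]) := by
  intro l
  induction l with
  | nil => intro acc; simp [PySem.Chars.replace.go]
  | cons c t ih =>
      intro acc
      rw [show (c :: t).length = t.length + 1 from rfl, PySem.Chars.replace.go]
      by_cases hc : c = a
      · subst hc
        simp [List.isPrefixOf, ih]
      · have hba : (a == c) = false := by simp [BEq.comm (a := a)]; exact fun h => hc h
        simp [List.isPrefixOf, hba, ih, hc]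

theorem pv_replace_single (l : List Char) (a : Char) (new : List Char) :
    PySem.Chars.replace l [a] new = l.flatMap (fun c => if c == a then new else [c]) := by
  rw [PySem.Chars.replace]
  simpa using pv_go_single a new l []

-- A's two replace passes compose to pvEsc
theorem pv_escaped_eq (l : List Char) :
    PySem.Chars.replace (PySem.Chars.replace l ['\\'] ['\\', '\\']) ['"'] ['\\', '"']
      = l.flatMap pvEsc := by
  rw [pv_replace_single, pv_replace_single, List.flatMap_assoc]
  refine List.flatMap_congr (fun c _ => ?_)
  by_cases h1 : c = '\\' <;> by_cases h2 : c = '"' <;> simp_all [pvEsc]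

-- B's fold invariant
theorem pv_fold_inv (l : List Char) :
    ∀ (b : Bool) (acc : List (List Char)),
      l.foldl
        (fun (st : Bool × List (List Char)) ch =>
          let need := if ch ∈ (" /[]\\".toList) then true else st.1
          let esc := if ch == '\\' then st.2 ++ [['\\', '\\']]
                     else if ch == '"' then st.2 ++ [['\\', '"']]
                     else st.2 ++ [[ch]]
          (need, esc)) (b, acc)
        = (b || l.any (fun c => decide (c ∈ (" /[]\\".toList))), acc ++ l.map pvEsc) := by
  induction l with
  | nil => intro b acc; simp
  | cons c t ih =>
      intro b acc
      simp only [List.foldl_cons, List.any_cons, ih, List.map_cons, pvEsc]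
      by_cases hm : c ∈ (" /[]\\".toList) <;>
        by_cases h1 : c = '\\' <;> by_cases h2 : c = '"' <;>
          simp_all [Bool.or_comm]

-- the two need-quote scans agree
theorem pv_need_eq (l : List Char) :
    (" /[]\\".toList).any (fun c => decide (c ∈ l))
      = l.any (fun c => decide (c ∈ (" /[]\\".toList))) := by
  rcases h : l.any (fun c => decide (c ∈ (" /[]\\".toList))) with _ | _
  · simp only [List.any_eq_false, decide_eq_true_eq] at h ⊢
    intro a ha hmem
    exact h a hmem ha
  · simp only [List.any_eq_true, decide_eq_true_eq] at h ⊢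
    obtain ⟨a, ha, hm⟩ := h
    exact ⟨a, hm, ha⟩

-- ===== VERDICT (by name: the statement is the Claim_ definition above) =====
theorem quote_mailbox_py_spec : Claim_equal_quote_mailbox_py := by
  intro folder _
  unfold Spec_quote_mailbox_py quote_mailbox_py quote_mailbox_py_alt
  by_cases he : folder = ""
  · simp [he]
  · have he' : (folder == "") = false := by simpa using he
    simp only [he', Bool.false_eq_true, if_false]
    rw [pv_fold_inv]
    have hn : (" /[]\\".toList).any (fun c => PySem.Str.isIn (String.ofList [c]) folder)
        = folder.toList.any (fun c => decide (c ∈ (" /[]\\".toList))) := by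
      rw [← pv_need_eq]
      congr 1
      funext c
      exact pv_isIn_single c folder
    rw [hn]
    rcases hneed : folder.toList.any (fun c => decide (c ∈ (" /[]\\".toList))) with _ | _
    · simp
    · simp only [Bool.false_or, Bool.not_true, Bool.false_eq_true, if_false, if_true, List.nil_append]
      have hesc : PySem.Str.replace (PySem.Str.replace folder "\\" "\\\\") "\"" "\\\""
          = String.ofList (folder.toList.map pvEsc).flatten := by
        have hl : (PySem.Str.replace (PySem.Str.replace folder "\\" "\\\\") "\"" "\\\"").toList
            = (folder.toList.map pvEsc).flatten := by
          rw [PySem.Str.toList_replace, PySem.Str.toList_replace]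
          simpa [List.flatMap_def] using pv_escaped_eq folder.toList
        have := congrArg String.ofList hl
        rwa [String.ofList_toList] at this
      rw [hesc]
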